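-- pv_equiv track=rewrite | github.com/thedanielbatinicproject/ADAS | scripts/context/analyze_video.py | _hit_button
-- ===== SOURCE A (Python) =====
-- from typing import Any, Dict, List, Optional, Tuple
--
-- _CTRL_H = 56
--
-- _BTN_W = 76
--
-- _BTN_PAD_Y = 8
--
-- _BTN_ACTIONS = [
--     ("<<", "first"),
--     ("<", "prev"),
--     ("||", "pause"),
--     (">", "next"),
--     (">>", "last"),
-- ]
--
-- def _hit_button(
--     click_x: int, click_y: int, ctrl_top_y: int, frame_w: int
-- ) -> Optional[str]:
--     """Return action if click landed on a button, else None."""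
--     cy = click_y - ctrl_top_y
--     if cy < _BTN_PAD_Y or cy > _CTRL_H - _BTN_PAD_Y:
--         return None
--     n = len(_BTN_ACTIONS)
--     spacing = max((frame_w - n * _BTN_W) // (n + 1), 6)
--     for i, (_, action) in enumerate(_BTN_ACTIONS):
--         bx = spacing + i * (_BTN_W + spacing)
--         if bx <= click_x <= bx + _BTN_W:
--             return action
--     return None
-- ===== SOURCE B (Python) =====
-- _CTRL_H = 56
-- _BTN_W = 76
-- _BTN_PAD_Y = 8
-- _BTN_ACTIONS = [
--     ("<<", "first"),
--     ("<", "prev"),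
--     ("||", "pause"),
--     (">", "next"),
--     (">>", "last"),
-- ]
--
-- def _hit_button(click_x, click_y, ctrl_top_y, frame_w):
--     """Closed-form hit test: compute the button index from the coordinate."""
--     cy = click_y - ctrl_top_y
--     if cy < _BTN_PAD_Y or cy > _CTRL_H - _BTN_PAD_Y:
--         return None
--     n = len(_BTN_ACTIONS)
--     spacing = max((frame_w - n * _BTN_W) // (n + 1), 6)
--     offset = click_x - spacing
--     if offset < 0:
--         return None
--     period = _BTN_W + spacing
--     i = offset // period
--     if i >= n:
--         return None
--     if offset - i * period <= _BTN_W: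
--         return _BTN_ACTIONS[i][1]
--     return None
-- ===== Notes on version B (the rewrite author's own statement) =====
-- stated objective: alternative
-- what changed: Replaced the loop scanning the five buttons with a closed-form computation of the button index via floor division by the button period.
import Mathlib
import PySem

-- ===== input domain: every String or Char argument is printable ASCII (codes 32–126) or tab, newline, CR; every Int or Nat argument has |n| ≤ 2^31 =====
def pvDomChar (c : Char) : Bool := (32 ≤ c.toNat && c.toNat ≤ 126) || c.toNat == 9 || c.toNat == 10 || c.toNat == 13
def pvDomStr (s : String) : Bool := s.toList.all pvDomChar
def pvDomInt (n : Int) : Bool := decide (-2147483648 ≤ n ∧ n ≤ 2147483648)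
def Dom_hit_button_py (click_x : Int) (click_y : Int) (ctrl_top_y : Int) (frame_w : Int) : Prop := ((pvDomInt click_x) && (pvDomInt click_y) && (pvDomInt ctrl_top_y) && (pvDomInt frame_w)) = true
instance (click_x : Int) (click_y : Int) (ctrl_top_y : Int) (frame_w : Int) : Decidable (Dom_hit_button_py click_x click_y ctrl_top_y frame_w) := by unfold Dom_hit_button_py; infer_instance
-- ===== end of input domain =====

-- B replaces the 5-button scan with a closed-form index computed by floor division; objective: alternative.
-- ===== PORT A =====
def pvBtnActions : List (String × String) :=
  [("<<", "first"), ("<", "prev"), ("||", "pause"), (">", "next"), (">>", "last")]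

-- the enumerate loop of A, index carried explicitly
def pvHitLoop (click_x : Int) (spacing : Int) : Int → List (String × String) → Option String
  | _, [] => none
  | i, (_, action) :: rest =>
    let bx := spacing + i * (76 + spacing)
    if bx ≤ click_x ∧ click_x ≤ bx + 76 then some action
    else pvHitLoop click_x spacing (i + 1) rest

def hit_button_py (click_x : Int) (click_y : Int) (ctrl_top_y : Int) (frame_w : Int) : Option String :=
  let cy := click_y - ctrl_top_y
  if cy < 8 ∨ cy > 56 - 8 then none
  else
    let n : Int := 5
    let spacing := max (PySem.Int.floordiv (frame_w - n * 76) (n + 1)) 6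
    pvHitLoop click_x spacing 0 pvBtnActions

-- ===== PORT B =====
def hit_button_py_alt (click_x : Int) (click_y : Int) (ctrl_top_y : Int) (frame_w : Int) : Option String :=
  let cy := click_y - ctrl_top_y
  if cy < 8 ∨ cy > 56 - 8 then none
  else
    let n : Int := 5
    let spacing := max (PySem.Int.floordiv (frame_w - n * 76) (n + 1)) 6
    let offset := click_x - spacing
    if offset < 0 then none
    else
      let period := 76 + spacing
      let i := PySem.Int.floordiv offset period
      if i ≥ n then none
      else if offset - i * period ≤ 76 then
        -- _BTN_ACTIONS[i][1]; i is in range here, so indexing succeeds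
        (PySem.List.pyGet? pvBtnActions i).map (fun p => p.2)
      else none

-- ===== PRECONDITION & SPEC =====
def Spec_hit_button_py (click_x : Int) (click_y : Int) (ctrl_top_y : Int) (frame_w : Int) (out : Option String) : Prop := out = hit_button_py_alt click_x click_y ctrl_top_y frame_w
instance (click_x : Int) (click_y : Int) (ctrl_top_y : Int) (frame_w : Int) (out : Option String) : Decidable (Spec_hit_button_py click_x click_y ctrl_top_y frame_w out) := by unfold Spec_hit_button_py; infer_instance

-- ===== CLAIM (what is proved, stated in full; the proofs are below) =====
def Claim_equal_hit_button_py : Prop := ∀ (click_x : Int) (click_y : Int) (ctrl_top_y : Int) (frame_w : Int), Dom_hit_button_py click_x click_y ctrl_top_y frame_w → Spec_hit_button_py click_x click_y ctrl_top_y frame_w (hit_button_py click_x click_y ctrl_top_y frame_w)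

-- ===== LEMMAS AND PROOFS =====

-- the scan over the five buttons equals the closed-form index computation, for any spacing ≥ 6
theorem pvHitLoop_closed (x s : Int) (hs : 6 ≤ s) :
    pvHitLoop x s 0 pvBtnActions =
      (if x - s < 0 then none
       else if PySem.Int.floordiv (x - s) (76 + s) ≥ 5 then none
       else if (x - s) - PySem.Int.floordiv (x - s) (76 + s) * (76 + s) ≤ 76 then
         (PySem.List.pyGet? pvBtnActions (PySem.Int.floordiv (x - s) (76 + s))).map (fun p => p.2)
       else none) := by
  have hp : (0:Int) < 76 + s := by omega
  by_cases hoff : x - s < 0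
  · simp only [if_pos hoff, pvBtnActions, pvHitLoop]
    split_ifs <;> first | rfl | omega
  · set q := PySem.Int.floordiv (x - s) (76 + s) with hq
    have hdm := PySem.Int.floordiv_mul_add_mod (x - s) (76 + s)
    rw [← hq] at hdm
    have hmod0 : 0 ≤ PySem.Int.mod (x - s) (76 + s) := by
      have := PySem.Int.mod_eq_emod_of_pos (a := x - s) hp
      rw [this]; exact Int.emod_nonneg _ (by omega)
    have hmodlt : PySem.Int.mod (x - s) (76 + s) < 76 + s := by
      have := PySem.Int.mod_eq_emod_of_pos (a := x - s) hp
      rw [this]; exact Int.emod_lt_of_pos _ hp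
    set r := PySem.Int.mod (x - s) (76 + s) with hr
    have hq0 : 0 ≤ q := by
      rw [hq, PySem.Int.floordiv_eq_ediv_of_pos hp]
      exact Int.ediv_nonneg (by omega) (by omega)
    simp only [if_neg hoff]
    by_cases hq5 : q ≥ 5
    · have h5 : 5 * (76 + s) ≤ q * (76 + s) :=
        mul_le_mul_of_nonneg_right hq5 (le_of_lt hp)
      simp only [if_pos hq5, pvBtnActions, pvHitLoop]
      split_ifs <;> first | rfl | omega
    · have hq4 : q ≤ 4 := by omega
      simp only [if_neg hq5]
      interval_cases q <;>
        simp only [pvBtnActions, pvHitLoop, PySem.List.pyGet?, PySem.List.pyIdx?,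
          PySem.Raise.InRange, List.length, Option.map] <;>
        norm_num <;> split_ifs <;> first | rfl | omega

-- ===== VERDICT (by name: the statement is the Claim_ definition above) =====
theorem hit_button_py_spec : Claim_equal_hit_button_py := by
  intro x y t w _
  unfold Spec_hit_button_py hit_button_py hit_button_py_alt
  by_cases hcy : (y - t < 8 ∨ y - t > 56 - 8)
  · simp only [if_pos hcy]
  · simp only [if_neg hcy]
    exact pvHitLoop_closed x _ (le_max_right _ _)
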